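-- pv_equiv track=rewrite | github.com/trac3er00/OMG | tests/perf/test_performance_v2.py | _make_python_source
-- ===== SOURCE A (Python) =====
-- def _make_python_source(lines: int) -> str:
--     """Generate realistic Python source of `lines` lines."""
--     parts = [
--         "import os",
--         "import sys",
--         "import json",
--         "from pathlib import Path",
--         "",
--         "",
--         "def process_data(items: list[dict]) -> dict:",
--         '    """Process data items and return summary."""',
--         "    result = {}",
--         "    for item in items:",
--         '        key = item.get("name", "unknown")',
--         "        value = item.get(\"value\", 0)",
--         "        if key in result:",
--         "            result[key] += value",
--         "        else:",
--         "            result[key] = value",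
--         "    return result",
--         "",
--         "",
--         "class DataHandler:",
--         '    """Handles data transformation and validation."""',
--         "",
--         "    def __init__(self, config: dict) -> None:",
--         "        self.config = config",
--         "        self._cache: dict = {}",
--         "",
--         "    def validate(self, data: dict) -> bool:",
--         '        required = self.config.get("required_fields", [])',
--         "        return all(f in data for f in required)",
--         "",
--     ]
--     # Repeat to reach target lines
--     source_lines: list[str] = []
--     while len(source_lines) < lines:
--         source_lines.extend(parts)
--     return "\n".join(source_lines[:lines])
-- ===== SOURCE B (Python) =====
-- def _make_python_source(lines: int) -> str:
--     """Generate realistic Python source of `lines` lines."""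
--     parts = [
--         "import os",
--         "import sys",
--         "import json",
--         "from pathlib import Path",
--         "",
--         "",
--         "def process_data(items: list[dict]) -> dict:",
--         '    """Process data items and return summary."""',
--         "    result = {}",
--         "    for item in items:",
--         '        key = item.get("name", "unknown")',
--         "        value = item.get(\"value\", 0)",
--         "        if key in result:",
--         "            result[key] += value",
--         "        else:",
--         "            result[key] = value",
--         "    return result",
--         "",
--         "",
--         "class DataHandler:",
--         '    """Handles data transformation and validation."""',
--         "",
--         "    def __init__(self, config: dict) -> None:",
--         "        self.config = config",
--         "        self._cache: dict = {}",
--         "",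
--         "    def validate(self, data: dict) -> bool:",
--         '        required = self.config.get("required_fields", [])',
--         "        return all(f in data for f in required)",
--         "",
--     ]
--     n = len(parts)
--     return "\n".join(parts[i % n] for i in range(lines))
-- ===== Notes on version B (the rewrite author's own statement) =====
-- stated objective: idiomatic
-- what changed: A builds an ever-growing tiled copy of parts with a while-loop of extends and slices it; B never materialises a tiled list at all, generating line i directly as parts[i % n] for i in range(lines).
import Mathlib
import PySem

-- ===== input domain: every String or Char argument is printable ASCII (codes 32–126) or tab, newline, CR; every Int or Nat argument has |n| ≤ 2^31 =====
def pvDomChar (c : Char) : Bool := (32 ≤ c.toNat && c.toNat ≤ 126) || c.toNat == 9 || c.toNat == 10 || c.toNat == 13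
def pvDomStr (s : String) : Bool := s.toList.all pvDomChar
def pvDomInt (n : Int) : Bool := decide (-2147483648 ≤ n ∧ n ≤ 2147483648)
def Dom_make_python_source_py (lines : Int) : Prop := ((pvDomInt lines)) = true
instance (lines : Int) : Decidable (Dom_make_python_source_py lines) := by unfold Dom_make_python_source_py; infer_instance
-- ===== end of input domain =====

-- B never materialises a tiled copy of `parts`: it generates line i directly as
-- parts[i % n] for i in range(lines) — a per-line modular-index generator instead of
-- A's extend-until-long-enough loop followed by a slice (objective: idiomatic).

-- ===== PORT A =====
-- the shared `parts` literal of both Pythons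
def pvParts : List String := [
  "import os",
  "import sys",
  "import json",
  "from pathlib import Path",
  "",
  "",
  "def process_data(items: list[dict]) -> dict:",
  "    \"\"\"Process data items and return summary.\"\"\"",
  "    result = {}",
  "    for item in items:",
  "        key = item.get(\"name\", \"unknown\")",
  "        value = item.get(\"value\", 0)",
  "        if key in result:",
  "            result[key] += value",
  "        else:",
  "            result[key] = value",
  "    return result",
  "",
  "",
  "class DataHandler:",
  "    \"\"\"Handles data transformation and validation.\"\"\"",
  "",
  "    def __init__(self, config: dict) -> None:",
  "        self.config = config",
  "        self._cache: dict = {}",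
  "",
  "    def validate(self, data: dict) -> bool:",
  "        required = self.config.get(\"required_fields\", [])",
  "        return all(f in data for f in required)",
  ""
]

-- A's `while len(source_lines) < lines: source_lines.extend(parts)`
def pvLoopA (lines : Int) (acc : List String) : List String :=
  if (acc.length : Int) < lines then pvLoopA lines (acc ++ pvParts) else acc
termination_by (lines - acc.length).toNat
decreasing_by simp [pvParts]; omega

def make_python_source_py (lines : Int) : String :=
  PySem.Str.join "\n" (PySem.List.slice (pvLoopA lines []) none (some lines))

-- ===== PORT B =====
-- B: "\n".join(parts[i % n] for i in range(lines)); i % n is always in range,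
-- so parts[i % n] is PySem.List.pyGetD with an irrelevant default
def make_python_source_py_alt (lines : Int) : String :=
  PySem.Str.join "\n"
    ((PySem.List.pyRange 0 lines 1).map
      (fun i => PySem.List.pyGetD pvParts (PySem.Int.mod i (pvParts.length : Int)) ""))

-- ===== PRECONDITION & SPEC =====
def Spec_make_python_source_py (lines : Int) (out : String) : Prop := out = make_python_source_py_alt lines
instance (lines : Int) (out : String) : Decidable (Spec_make_python_source_py lines out) := by unfold Spec_make_python_source_py; infer_instance

-- ===== CLAIM (what is proved, stated in full; the proofs are below) =====
def Claim_equal_make_python_source_py : Prop := ∀ (lines : Int), Dom_make_python_source_py lines → Spec_make_python_source_py lines (make_python_source_py lines)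

-- ===== LEMMAS AND PROOFS =====

-- number of repetitions the while-loop still performs when `d` lines are missing
def pvExt (d : Int) : Nat := if d ≤ 0 then 0 else ((d + 29) / 30).toNat

theorem pvParts_length : pvParts.length = 30 := by decide

theorem pvExt_succ (d : Int) (h : 0 < d) : pvExt d = pvExt (d - 30) + 1 := by
  unfold pvExt
  split_ifs <;> omega

theorem pvLoopA_eq (lines : Int) (acc : List String) :
    pvLoopA lines acc = acc ++ (List.replicate (pvExt (lines - acc.length)) pvParts).flatten := by
  fun_induction pvLoopA lines acc with
  | case1 acc h ih =>
    rw [ih]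
    have hlen : ((acc ++ pvParts).length : Int) = (acc.length : Int) + 30 := by
      simp [pvParts_length]
    rw [hlen]
    have : lines - ((acc.length : Int) + 30) = (lines - acc.length) - 30 := by ring
    rw [this, pvExt_succ (lines - (acc.length : Int)) (by omega)]
    simp [List.replicate_succ, List.append_assoc]
  | case2 acc h =>
    have : pvExt (lines - (acc.length : Int)) = 0 := by unfold pvExt; split_ifs <;> omega
    simp [this]

-- index m of the k-fold tiling of pvParts is pvParts[m % 30]
theorem pvFlat_get (k m : Nat) (h : m < 30 * k) :
    ((List.replicate k pvParts).flatten)[m]? = pvParts[m % 30]? := by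
  induction k generalizing m with
  | zero => omega
  | succ k ih =>
    rw [List.replicate_succ, List.flatten_cons]
    by_cases hm : m < 30
    · rw [List.getElem?_append_left (by rw [pvParts_length]; omega)]
      have : m % 30 = m := Nat.mod_eq_of_lt hm
      rw [this]
    · rw [List.getElem?_append_right (by rw [pvParts_length]; omega), pvParts_length,
          ih (m - 30) (by omega)]
      have : (m - 30) % 30 = m % 30 := by omega
      rw [this]

-- the first m entries of a sufficiently long tiling, line by line
theorem pvTake_flat (k m : Nat) (h : m ≤ 30 * k) :
    ((List.replicate k pvParts).flatten).take m
      = (List.range m).map (fun i => pvParts.getD (i % 30) "") := by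
  induction m with
  | zero => simp
  | succ m ih =>
    rw [List.take_add_one, List.range_succ, List.map_append, ih (by omega)]
    rw [pvFlat_get k m (by omega)]
    have h30 : m % 30 < pvParts.length := by rw [pvParts_length]; omega
    simp [List.getElem?_eq_getElem h30]

theorem pvExt_covers (lines : Int) (h : 0 < lines) : lines ≤ 30 * (pvExt lines : Int) := by
  unfold pvExt
  split_ifs
  · omega
  · omega

-- ===== VERDICT (by name: the statement is the Claim_ definition above) =====
theorem make_python_source_py_spec : Claim_equal_make_python_source_py := by
  intro lines _
  unfold Spec_make_python_source_py make_python_source_py make_python_source_py_alt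
  rw [pvLoopA_eq]
  simp only [List.nil_append, List.length_nil, Int.natCast_zero, sub_zero]
  by_cases h : lines ≤ 0
  · have h1 : pvExt lines = 0 := by unfold pvExt; split_ifs <;> omega
    rw [PySem.List.pyRange_one_eq_nil (by omega)]
    simp [h1, PySem.List.slice]
  · have hm : lines = ((lines.toNat : Nat) : Int) := by omega
    rw [hm, PySem.List.slice_to_natCast, PySem.List.pyRange_one]
    simp only [sub_zero, Int.toNat_natCast, List.map_map]
    rw [pvTake_flat (pvExt ((lines.toNat : Nat) : Int)) lines.toNat
      (by have := pvExt_covers ((lines.toNat : Nat) : Int) (by omega); omega)]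
    congr 1
    apply List.map_congr_left
    intro i _
    simp only [Function.comp, pvParts_length, zero_add]
    rw [PySem.Int.mod_natCast, PySem.List.pyGetD_natCast]
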